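-- pv_equiv track=rewrite | github.com/Neal2812/geo-compliance-classifier | artifact_preprocessor/reporter.py | _categorize_warning
-- ===== SOURCE A (Python) =====
-- def _categorize_warning(warning: str) -> str:
--     """Categorize a warning message.
--
--     Args:
--         warning: Warning message
--
--     Returns:
--         Warning category
--     """
--     warning_lower = warning.lower()
--
--     if any(keyword in warning_lower for keyword in ['pdf', 'pypdf', 'pdfminer']):
--         return "PDF Parsing Issues"
--     elif any(keyword in warning_lower for keyword in ['docx', 'python-docx']):
--         return "DOCX Parsing Issues"
--     elif any(keyword in warning_lower for keyword in ['encoding', 'decode', 'unicode']):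
--         return "Encoding Issues"
--     elif any(keyword in warning_lower for keyword in ['field', 'extract']):
--         return "Field Extraction Issues"
--     elif any(keyword in warning_lower for keyword in ['term', 'expansion']):
--         return "Codename Expansion Issues"
--     else:
--         return "General Issues"
-- ===== SOURCE B (Python) =====
-- _KEYWORD_PRIORITY = {
--     "pdf": 0, "pypdf": 0, "pdfminer": 0,
--     "docx": 1, "python-docx": 1,
--     "encoding": 2, "decode": 2, "unicode": 2,
--     "field": 3, "extract": 3,
--     "term": 4, "expansion": 4,
-- }
--
-- _LABELS = [
--     "PDF Parsing Issues",
--     "DOCX Parsing Issues",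
--     "Encoding Issues",
--     "Field Extraction Issues",
--     "Codename Expansion Issues",
--     "General Issues",
-- ]
--
--
-- def _categorize_warning(warning: str) -> str:
--     warning_lower = warning.lower()
--     best = min(
--         (priority for keyword, priority in _KEYWORD_PRIORITY.items()
--          if keyword in warning_lower),
--         default=len(_LABELS) - 1,
--     )
--     return _LABELS[best]
-- ===== Notes on version B (the rewrite author's own statement) =====
-- stated objective: alternative
-- what changed: Instead of A's first-match scan over category branches, B checks every keyword against a flat keyword-to-priority map, takes the minimum matching priority (default = last slot), and indexes a label table with it.
import Mathlib
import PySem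

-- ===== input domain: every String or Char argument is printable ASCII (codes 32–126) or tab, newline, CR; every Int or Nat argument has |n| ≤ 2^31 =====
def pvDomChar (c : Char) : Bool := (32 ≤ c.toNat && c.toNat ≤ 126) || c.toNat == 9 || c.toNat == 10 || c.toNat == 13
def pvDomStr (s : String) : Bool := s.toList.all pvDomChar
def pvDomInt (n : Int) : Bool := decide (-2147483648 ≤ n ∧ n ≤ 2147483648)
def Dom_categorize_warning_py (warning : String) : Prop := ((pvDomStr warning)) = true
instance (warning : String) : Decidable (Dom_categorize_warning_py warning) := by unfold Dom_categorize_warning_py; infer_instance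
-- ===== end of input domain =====

-- B replaces A's priority-ordered first-match branch scan by a flat keyword→priority map:
-- it takes the minimum priority among all matching keywords and indexes a label table (alternative decomposition, same cost).

-- ===== PORT A =====
def categorize_warning_py (warning : String) : String :=
  let warning_lower := PySem.Str.lower warning
  if (["pdf", "pypdf", "pdfminer"] : List String).any (fun keyword => PySem.Str.isIn keyword warning_lower) then
    "PDF Parsing Issues"
  else if (["docx", "python-docx"] : List String).any (fun keyword => PySem.Str.isIn keyword warning_lower) then
    "DOCX Parsing Issues"
  else if (["encoding", "decode", "unicode"] : List String).any (fun keyword => PySem.Str.isIn keyword warning_lower) then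
    "Encoding Issues"
  else if (["field", "extract"] : List String).any (fun keyword => PySem.Str.isIn keyword warning_lower) then
    "Field Extraction Issues"
  else if (["term", "expansion"] : List String).any (fun keyword => PySem.Str.isIn keyword warning_lower) then
    "Codename Expansion Issues"
  else
    "General Issues"

-- ===== PORT B =====
def pvKeywordPriority : List (String × Nat) :=
  [ ("pdf", 0), ("pypdf", 0), ("pdfminer", 0),
    ("docx", 1), ("python-docx", 1),
    ("encoding", 2), ("decode", 2), ("unicode", 2),
    ("field", 3), ("extract", 3),
    ("term", 4), ("expansion", 4) ]

def pvLabels : List String :=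
  [ "PDF Parsing Issues", "DOCX Parsing Issues", "Encoding Issues",
    "Field Extraction Issues", "Codename Expansion Issues", "General Issues" ]

def categorize_warning_py_alt (warning : String) : String :=
  let warning_lower := PySem.Str.lower warning
  -- min(priority for matching keyword, default=len(_LABELS)-1) ported as a fold of `min`
  let best : Nat := pvKeywordPriority.foldl
      (fun acc kp => if PySem.Str.isIn kp.1 warning_lower then min acc kp.2 else acc)
      (pvLabels.length - 1)
  pvLabels.getD best "General Issues"

-- ===== PRECONDITION & SPEC =====
def Spec_categorize_warning_py (warning : String) (out : String) : Prop := out = categorize_warning_py_alt warning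
instance (warning : String) (out : String) : Decidable (Spec_categorize_warning_py warning out) := by unfold Spec_categorize_warning_py; infer_instance

-- ===== CLAIM (what is proved, stated in full; the proofs are below) =====
def Claim_equal_categorize_warning_py : Prop := ∀ (warning : String), Dom_categorize_warning_py warning → Spec_categorize_warning_py warning (categorize_warning_py warning)

-- ===== LEMMAS AND PROOFS =====
-- Folding `min` over a segment whose entries all carry priority p is
-- `min acc p` iff some keyword of the segment matches, else `acc`.
theorem pv_seg (wl : String) (p : Nat) (l : List (String × Nat))
    (h : ∀ kp ∈ l, kp.2 = p) (acc : Nat) :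
    l.foldl (fun acc kp => if PySem.Str.isIn kp.1 wl then min acc kp.2 else acc) acc
      = if l.any (fun kp => PySem.Str.isIn kp.1 wl) then min acc p else acc := by
  induction l generalizing acc with
  | nil => simp
  | cons kp t ih =>
    have hkp : kp.2 = p := h kp (List.mem_cons_self)
    have ht : ∀ x ∈ t, x.2 = p := fun x hx => h x (List.mem_cons_of_mem _ hx)
    by_cases hm : PySem.Str.isIn kp.1 wl = true
    · simp only [List.foldl_cons, List.any_cons, hm, if_pos, Bool.true_or, hkp,
        ih ht (min acc p)]
      by_cases ha : t.any (fun kp => PySem.Str.isIn kp.1 wl) = true <;> simp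
    · simp only [List.foldl_cons, List.any_cons, hm, Bool.false_or,
        Bool.false_eq_true, if_false, ih ht acc]

theorem pv_fold_groups (wl : String) :
    pvKeywordPriority.foldl
        (fun acc kp => if PySem.Str.isIn kp.1 wl then min acc kp.2 else acc)
        (pvLabels.length - 1)
      = (if ([("pdf", 0), ("pypdf", 0), ("pdfminer", (0:Nat))] : List (String × Nat)).any (fun kp => PySem.Str.isIn kp.1 wl) then 0
         else if ([("docx", 1), ("python-docx", 1)] : List (String × Nat)).any (fun kp => PySem.Str.isIn kp.1 wl) then 1
         else if ([("encoding", 2), ("decode", 2), ("unicode", 2)] : List (String × Nat)).any (fun kp => PySem.Str.isIn kp.1 wl) then 2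
         else if ([("field", 3), ("extract", 3)] : List (String × Nat)).any (fun kp => PySem.Str.isIn kp.1 wl) then 3
         else if ([("term", 4), ("expansion", 4)] : List (String × Nat)).any (fun kp => PySem.Str.isIn kp.1 wl) then 4
         else 5) := by
  have e : pvKeywordPriority
      = [("pdf", 0), ("pypdf", 0), ("pdfminer", (0:Nat))]
        ++ [("docx", 1), ("python-docx", 1)]
        ++ [("encoding", 2), ("decode", 2), ("unicode", 2)]
        ++ [("field", 3), ("extract", 3)]
        ++ [("term", 4), ("expansion", 4)] := rfl
  rw [e, List.foldl_append, List.foldl_append, List.foldl_append, List.foldl_append,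
    pv_seg wl 4 _ (by decide), pv_seg wl 3 _ (by decide), pv_seg wl 2 _ (by decide),
    pv_seg wl 1 _ (by decide), pv_seg wl 0 _ (by decide)]
  simp only [pvLabels, List.length_cons, List.length_nil]
  split_ifs <;> decide

-- ===== VERDICT (by name: the statement is the Claim_ definition above) =====
theorem categorize_warning_py_spec : Claim_equal_categorize_warning_py := by
  intro warning _
  simp only [Spec_categorize_warning_py, categorize_warning_py, categorize_warning_py_alt]
  rw [pv_fold_groups (PySem.Str.lower warning)]
  rw [show ([("pdf", 0), ("pypdf", 0), ("pdfminer", (0:Nat))] : List (String × Nat)).any (fun kp => PySem.Str.isIn kp.1 (PySem.Str.lower warning)) = (["pdf", "pypdf", "pdfminer"] : List String).any (fun keyword => PySem.Str.isIn keyword (PySem.Str.lower warning)) from rfl]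
  rw [show ([("docx", 1), ("python-docx", 1)] : List (String × Nat)).any (fun kp => PySem.Str.isIn kp.1 (PySem.Str.lower warning)) = (["docx", "python-docx"] : List String).any (fun keyword => PySem.Str.isIn keyword (PySem.Str.lower warning)) from rfl]
  rw [show ([("encoding", 2), ("decode", 2), ("unicode", 2)] : List (String × Nat)).any (fun kp => PySem.Str.isIn kp.1 (PySem.Str.lower warning)) = (["encoding", "decode", "unicode"] : List String).any (fun keyword => PySem.Str.isIn keyword (PySem.Str.lower warning)) from rfl]
  rw [show ([("field", 3), ("extract", 3)] : List (String × Nat)).any (fun kp => PySem.Str.isIn kp.1 (PySem.Str.lower warning)) = (["field", "extract"] : List String).any (fun keyword => PySem.Str.isIn keyword (PySem.Str.lower warning)) from rfl]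
  rw [show ([("term", 4), ("expansion", 4)] : List (String × Nat)).any (fun kp => PySem.Str.isIn kp.1 (PySem.Str.lower warning)) = (["term", "expansion"] : List String).any (fun keyword => PySem.Str.isIn keyword (PySem.Str.lower warning)) from rfl]
  split_ifs <;> rfl
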